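-- pv_equiv track=rewrite | github.com/TrelisResearch/arc-agi-2025 | experimental/hf_programs_evaluation/compare_with_passthrough.py | best_soar_transform
-- ===== SOURCE A (Python) =====
-- def best_soar_transform(grid_lst):
--     """Best SOAR program from parquet."""
--     rows = len(grid_lst)
--     cols = len(grid_lst[0])
--     output_grid = [row[:] for row in grid_lst]
--
--     def is_surrounded_by_4s(i, j):
--         if i > 0 and grid_lst[i - 1][j] != 4:
--             return False
--         if i < rows - 1 and grid_lst[i + 1][j] != 4:
--             return False
--         if j > 0 and grid_lst[i][j - 1] != 4:
--             return False
--         if j < cols - 1 and grid_lst[i][j + 1] != 4: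
--             return False
--         return True
--
--     for i in range(rows):
--         for j in range(cols):
--             if grid_lst[i][j] == 2:
--                 if is_surrounded_by_4s(i, j):
--                     output_grid[i][j] = 8
--             elif grid_lst[i][j] == 4:
--                 if is_surrounded_by_4s(i, j):
--                     output_grid[i][j] = 8
--     return output_grid
-- ===== SOURCE B (Python) =====
-- def best_soar_transform(grid_lst):
--     """Scatter version: non-4 cells disqualify their neighbors via a coordinate set."""
--     rows = len(grid_lst)
--     cols = len(grid_lst[0])
--     disq = set()
--     for i in range(rows):
--         for j in range(cols):
--             if grid_lst[i][j] != 4: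
--                 disq.add((i - 1, j))
--                 disq.add((i + 1, j))
--                 disq.add((i, j - 1))
--                 disq.add((i, j + 1))
--     out = [row[:] for row in grid_lst]
--     for i in range(rows):
--         for j in range(cols):
--             if grid_lst[i][j] in (2, 4) and (i, j) not in disq:
--                 out[i][j] = 8
--     return out
-- ===== Notes on version B (the rewrite author's own statement) =====
-- stated objective: alternative
-- what changed: Replaces the per-cell gather of four neighbor checks with a scatter pass: every non-4 cell inserts its four neighbor coordinates into a disqualification set, then a second pass recolors 2/4 cells whose coordinate was never disqualified.
import Mathlib
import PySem

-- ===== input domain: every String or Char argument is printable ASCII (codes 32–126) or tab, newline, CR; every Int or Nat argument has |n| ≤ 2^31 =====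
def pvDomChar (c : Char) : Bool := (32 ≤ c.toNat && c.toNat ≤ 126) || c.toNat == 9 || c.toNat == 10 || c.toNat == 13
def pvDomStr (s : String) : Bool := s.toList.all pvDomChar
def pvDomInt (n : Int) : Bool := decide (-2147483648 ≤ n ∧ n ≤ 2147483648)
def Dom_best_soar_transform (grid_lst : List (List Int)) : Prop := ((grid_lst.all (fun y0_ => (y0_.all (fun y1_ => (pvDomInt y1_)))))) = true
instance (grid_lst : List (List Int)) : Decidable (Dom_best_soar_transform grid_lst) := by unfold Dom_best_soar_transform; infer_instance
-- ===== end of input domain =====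

-- B replaces A's per-cell gather of neighbor checks by a scatter pass that collects disqualified
-- coordinates in a set (objective: alternative decomposition, same asymptotic cost).

-- ===== PORT A =====
-- grid_lst[i][j]; every access the Python actually evaluates is in range under Pre_, the defaults are never reached there
def pvCell (g : List (List Int)) (i j : Int) : Int :=
  (PySem.List.pyGet? ((PySem.List.pyGet? g i).getD []) j).getD 0

-- out[i][j] = v
def pvSet2 (out : List (List Int)) (i j : Int) (v : Int) : List (List Int) :=
  PySem.List.pySetD out i (PySem.List.pySetD (PySem.List.pyGetD out i []) j v)

-- helper is_surrounded_by_4s, branch for branch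
def pvSurr (g : List (List Int)) (rows cols i j : Int) : Bool :=
  if 0 < i && pvCell g (i-1) j != 4 then false
  else if i < rows - 1 && pvCell g (i+1) j != 4 then false
  else if 0 < j && pvCell g i (j-1) != 4 then false
  else if j < cols - 1 && pvCell g i (j+1) != 4 then false
  else true

def pvCols (g : List (List Int)) : Int := (((PySem.List.pyGet? g 0).getD []).length : Int)

def best_soar_transform (grid_lst : List (List Int)) : List (List Int) :=
  let rows : Int := grid_lst.length
  let cols : Int := pvCols grid_lst
  (PySem.List.pyRange 0 rows 1).foldl (fun out i =>
    (PySem.List.pyRange 0 cols 1).foldl (fun out j =>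
      if pvCell grid_lst i j == 2 then
        (if pvSurr grid_lst rows cols i j then pvSet2 out i j 8 else out)
      else if pvCell grid_lst i j == 4 then
        (if pvSurr grid_lst rows cols i j then pvSet2 out i j 8 else out)
      else out) out) grid_lst

-- ===== PORT B =====
-- first pass of Source B: every non-4 cell adds its four neighbor coordinates to the set
def pvDisq (g : List (List Int)) (rows cols : Int) : PySem.Set (Int × Int) :=
  (PySem.List.pyRange 0 rows 1).foldl (fun s i =>
    (PySem.List.pyRange 0 cols 1).foldl (fun s j =>
      if pvCell g i j != 4 then
        ((((PySem.Set.add s (i-1, j)).add (i+1, j)).add (i, j-1)).add (i, j+1))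
      else s) s) PySem.Set.empty

def best_soar_transform_alt (grid_lst : List (List Int)) : List (List Int) :=
  let rows : Int := grid_lst.length
  let cols : Int := pvCols grid_lst
  let disq := pvDisq grid_lst rows cols
  (PySem.List.pyRange 0 rows 1).foldl (fun out i =>
    (PySem.List.pyRange 0 cols 1).foldl (fun out j =>
      if (pvCell grid_lst i j == 2 || pvCell grid_lst i j == 4)
          && !(PySem.Set.contains disq (i, j)) then
        pvSet2 out i j 8
      else out) out) grid_lst

-- ===== PRECONDITION & SPEC =====
-- Pre_: exactly the inputs where the Python A returns — a nonempty grid whose rows all have at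
-- least the first row's length (otherwise an indexing raises IndexError in both programs).
def Pre_best_soar_transform (grid_lst : List (List Int)) : Prop :=
  grid_lst ≠ [] ∧ ∀ row ∈ grid_lst, pvCols grid_lst ≤ (row.length : Int)
instance (grid_lst : List (List Int)) : Decidable (Pre_best_soar_transform grid_lst) := by
  unfold Pre_best_soar_transform; infer_instance

def pvWitness_best_soar_transform : List (List Int) := [[2, 4], [4, 0]]

def Spec_best_soar_transform (grid_lst : List (List Int)) (out : List (List Int)) : Prop := out = best_soar_transform_alt grid_lst
instance (grid_lst : List (List Int)) (out : List (List Int)) : Decidable (Spec_best_soar_transform grid_lst out) := by unfold Spec_best_soar_transform; infer_instance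

-- ===== CLAIM (what is proved, stated in full; the proofs are below) =====
def Claim_equal_best_soar_transform : Prop := ∀ (grid_lst : List (List Int)), Dom_best_soar_transform grid_lst → Pre_best_soar_transform grid_lst → Spec_best_soar_transform grid_lst (best_soar_transform grid_lst)

-- ===== LEMMAS AND PROOFS =====

-- fold congruence on members
lemma pv_foldl_congr_mem {α β : Type} (l : List α) (f g : β → α → β) (b : β)
    (h : ∀ x ∈ l, ∀ acc, f acc x = g acc x) : l.foldl f b = l.foldl g b := by
  induction l generalizing b with
  | nil => rfl
  | cons a t ih =>
    simp only [List.foldl_cons]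
    rw [h a (by simp)]
    exact ih _ (fun x hx acc => h x (by simp [hx]) acc)

-- membership in a set-accumulating fold
lemma pv_mem_foldl_set {α β : Type} [BEq β] [LawfulBEq β]
    (f : PySem.Set β → α → PySem.Set β) (C : α → β → Prop)
    (h : ∀ s a p, p ∈ f s a ↔ p ∈ s ∨ C a p) :
    ∀ (l : List α) (s : PySem.Set β) (p : β), p ∈ l.foldl f s ↔ p ∈ s ∨ ∃ a ∈ l, C a p := by
  intro l
  induction l with
  | nil => simp
  | cons a t ih =>
    intro s p
    simp only [List.foldl_cons, ih, h, List.mem_cons]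
    constructor
    · rintro ((hs | hc) | ⟨b, hb, hc⟩)
      · exact Or.inl hs
      · exact Or.inr ⟨a, Or.inl rfl, hc⟩
      · exact Or.inr ⟨b, Or.inr hb, hc⟩
    · rintro (hs | ⟨b, (rfl | hb), hc⟩)
      · exact Or.inl (Or.inl hs)
      · exact Or.inl (Or.inr hc)
      · exact Or.inr ⟨b, hb, hc⟩

def pvNbr (a b : Int) (p : Int × Int) : Prop :=
  p = (a - 1, b) ∨ p = (a + 1, b) ∨ p = (a, b - 1) ∨ p = (a, b + 1)

lemma pv_mem_disq (g : List (List Int)) (rows cols : Int) (p : Int × Int) :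
    p ∈ pvDisq g rows cols ↔
      ∃ a, (0 ≤ a ∧ a < rows) ∧ ∃ b, (0 ≤ b ∧ b < cols) ∧ pvCell g a b ≠ 4 ∧ pvNbr a b p := by
  unfold pvDisq
  rw [pv_mem_foldl_set _
    (fun a p => ∃ b, (0 ≤ b ∧ b < cols) ∧ pvCell g a b ≠ 4 ∧ pvNbr a b p)
    (by
      intro s a p
      rw [pv_mem_foldl_set _ (fun b p => pvCell g a b ≠ 4 ∧ pvNbr a b p)
        (by
          intro s b p
          split
          · next h =>
            have hcell : pvCell g a b ≠ 4 := by simpa using h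
            simp only [PySem.Set.mem_add, pvNbr, ne_eq]
            tauto
          · next h =>
            have hcell : pvCell g a b = 4 := by simpa using h
            simp [hcell])]
      simp only [PySem.List.mem_pyRange_one])]
  simp only [PySem.List.mem_pyRange_one, PySem.Set.empty, List.not_mem_nil, false_or]

lemma pv_surr_false_iff (g : List (List Int)) (rows cols i j : Int) :
    pvSurr g rows cols i j = false ↔
      ((0 < i ∧ pvCell g (i-1) j ≠ 4) ∨ (i < rows - 1 ∧ pvCell g (i+1) j ≠ 4) ∨
       (0 < j ∧ pvCell g i (j-1) ≠ 4) ∨ (j < cols - 1 ∧ pvCell g i (j+1) ≠ 4)) := by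
  unfold pvSurr
  split_ifs with h1 h2 h3 h4 <;>
    simp_all [Bool.and_eq_true, bne_iff_ne]

lemma pv_disq_contains (g : List (List Int)) (rows cols i j : Int)
    (hi0 : 0 ≤ i) (hir : i < rows) (hj0 : 0 ≤ j) (hjc : j < cols) :
    PySem.Set.contains (pvDisq g rows cols) (i, j) = !pvSurr g rows cols i j := by
  have hiff : (i, j) ∈ pvDisq g rows cols ↔ pvSurr g rows cols i j = false := by
    rw [pv_mem_disq, pv_surr_false_iff]
    constructor
    · rintro ⟨a, ⟨ha0, har⟩, b, ⟨hb0, hbc⟩, hcell, hnbr⟩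
      rcases hnbr with h | h | h | h
      · obtain ⟨h1, h2⟩ : i = a - 1 ∧ j = b := by simpa [Prod.ext_iff] using h
        subst h1; subst h2
        refine Or.inr (Or.inl ⟨by omega, ?_⟩)
        rw [show a - 1 + 1 = a from by ring]; exact hcell
      · obtain ⟨h1, h2⟩ : i = a + 1 ∧ j = b := by simpa [Prod.ext_iff] using h
        subst h1; subst h2
        refine Or.inl ⟨by omega, ?_⟩
        rw [show a + 1 - 1 = a from by ring]; exact hcell
      · obtain ⟨h1, h2⟩ : i = a ∧ j = b - 1 := by simpa [Prod.ext_iff] using h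
        subst h1; subst h2
        refine Or.inr (Or.inr (Or.inr ⟨by omega, ?_⟩))
        rw [show b - 1 + 1 = b from by ring]; exact hcell
      · obtain ⟨h1, h2⟩ : i = a ∧ j = b + 1 := by simpa [Prod.ext_iff] using h
        subst h1; subst h2
        refine Or.inr (Or.inr (Or.inl ⟨by omega, ?_⟩))
        rw [show b + 1 - 1 = b from by ring]; exact hcell
    · rintro (⟨hgt, hne⟩ | ⟨hlt, hne⟩ | ⟨hgt, hne⟩ | ⟨hlt, hne⟩)
      · exact ⟨i - 1, ⟨by omega, by omega⟩, j, ⟨hj0, hjc⟩, hne,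
          Or.inr (Or.inl (by rw [show i - 1 + 1 = i from by ring]))⟩
      · exact ⟨i + 1, ⟨by omega, by omega⟩, j, ⟨hj0, hjc⟩, hne,
          Or.inl (by rw [show i + 1 - 1 = i from by ring])⟩
      · exact ⟨i, ⟨hi0, hir⟩, j - 1, ⟨by omega, by omega⟩, hne,
          Or.inr (Or.inr (Or.inr (by rw [show j - 1 + 1 = j from by ring])))⟩
      · exact ⟨i, ⟨hi0, hir⟩, j + 1, ⟨by omega, by omega⟩, hne,
          Or.inr (Or.inr (Or.inl (by rw [show j + 1 - 1 = j from by ring])))⟩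
  by_cases hmem : (i, j) ∈ pvDisq g rows cols
  · have h1 : PySem.Set.contains (pvDisq g rows cols) (i, j) = true := by
      rw [PySem.Set.contains_iff]; exact hmem
    rw [h1, hiff.mp hmem]; rfl
  · have h1 : PySem.Set.contains (pvDisq g rows cols) (i, j) = false := by
      cases hc : PySem.Set.contains (pvDisq g rows cols) (i, j)
      · rfl
      · exact absurd ((PySem.Set.contains_iff _ _).mp hc) hmem
    have h2 : pvSurr g rows cols i j = true := by
      cases hs : pvSurr g rows cols i j
      · exact absurd (hiff.mpr hs) hmem
      · rfl
    rw [h1, h2]; rfl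

-- ===== VERDICT (by name: the statement is the Claim_ definition above) =====
theorem best_soar_transform_spec : Claim_equal_best_soar_transform := by
  intro g _ _
  unfold Spec_best_soar_transform best_soar_transform best_soar_transform_alt
  apply pv_foldl_congr_mem
  intro i hi out
  apply pv_foldl_congr_mem
  intro j hj acc
  rw [PySem.List.mem_pyRange_one] at hi hj
  rw [pv_disq_contains g _ _ i j hi.1 hi.2 hj.1 hj.2]
  cases hs : pvSurr g g.length (pvCols g) i j <;>
    by_cases h2 : pvCell g i j = 2 <;>
    by_cases h4 : pvCell g i j = 4 <;>
    simp [h2, h4]
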